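-- pv_equiv track=rewrite | github.com/Neverlol/invoice-demo-batch-import | tax_invoice_demo/workbench.py | _rows_to_tab_text
-- ===== SOURCE A (Python) =====
-- def _rows_to_tab_text(rows: list[list[str]]) -> str:
--     lines: list[str] = []
--     for row in rows[:500]:
--         trimmed = [cell.strip() for cell in row]
--         while trimmed and not trimmed[-1]:
--             trimmed.pop()
--         if any(trimmed):
--             lines.append("\t".join(trimmed))
--     return "\n".join(lines)
-- ===== SOURCE B (Python) =====
-- def _rows_to_tab_text(rows: list[list[str]]) -> str:
--     lines: list[str] = []
--     for row in rows[:500]: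
--         trimmed = [cell.strip() for cell in row]
--         last = -1
--         for i, cell in enumerate(trimmed):
--             if cell:
--                 last = i
--         if last >= 0:
--             lines.append("\t".join(trimmed[:last + 1]))
--     return "\n".join(lines)
-- ===== Notes on version B (the rewrite author's own statement) =====
-- stated objective: alternative
-- what changed: The backward while/pop loop that strips trailing empty cells plus the any() emptiness test is replaced by a single forward scan recording the index of the last non-empty stripped cell; the row is skipped when no such index exists, otherwise joined up to that index via a slice.
import Mathlib
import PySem

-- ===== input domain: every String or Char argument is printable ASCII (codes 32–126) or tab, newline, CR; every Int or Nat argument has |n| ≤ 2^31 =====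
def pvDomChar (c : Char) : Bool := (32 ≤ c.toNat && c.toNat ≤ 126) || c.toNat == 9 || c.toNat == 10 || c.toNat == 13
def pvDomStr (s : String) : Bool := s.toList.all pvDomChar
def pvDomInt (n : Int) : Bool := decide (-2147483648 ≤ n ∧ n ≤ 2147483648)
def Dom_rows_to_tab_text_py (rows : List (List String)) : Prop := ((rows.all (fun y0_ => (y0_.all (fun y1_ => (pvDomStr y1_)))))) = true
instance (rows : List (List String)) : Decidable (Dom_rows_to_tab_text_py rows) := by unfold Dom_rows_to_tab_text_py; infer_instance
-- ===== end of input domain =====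

-- B replaces A's backward while/pop trimming of trailing empty cells by a single forward
-- scan for the last non-empty cell index and a slice (objective: alternative decomposition).


-- ===== PORT A =====
-- A's 'while trimmed and not trimmed[-1]: trimmed.pop()' loop: popping from the end of the
-- list is dropping the leading empty strings of its reverse, step for step.
def pvPopEmptyRev : List String → List String
  | [] => []
  | x :: xs => if x == "" then pvPopEmptyRev xs else x :: xs

def rows_to_tab_text_py (rows : List (List String)) : String :=
  let lines : List String :=
    (PySem.List.slice rows none (some 500)).foldl (fun lines row =>
      let trimmed := row.map PySem.Str.strip
      let trimmed := (pvPopEmptyRev trimmed.reverse).reverse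
      if trimmed.any (fun s => !(s == "")) then lines ++ [PySem.Str.join "\t" trimmed]
      else lines) []
  PySem.Str.join "\n" lines

-- ===== PORT B =====
def rows_to_tab_text_py_alt (rows : List (List String)) : String :=
  let lines : List String :=
    (PySem.List.slice rows none (some 500)).foldl (fun lines row =>
      let trimmed := row.map PySem.Str.strip
      let last := (PySem.List.enumerate trimmed).foldl
        (fun last p => if !(p.2 == "") then p.1 else last) (-1 : Int)
      if 0 ≤ last then
        lines ++ [PySem.Str.join "\t" (PySem.List.slice trimmed none (some (last + 1)))]
      else lines) []
  PySem.Str.join "\n" lines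

-- ===== PRECONDITION & SPEC =====
def Spec_rows_to_tab_text_py (rows : List (List String)) (out : String) : Prop := out = rows_to_tab_text_py_alt rows
instance (rows : List (List String)) (out : String) : Decidable (Spec_rows_to_tab_text_py rows out) := by unfold Spec_rows_to_tab_text_py; infer_instance

-- ===== CLAIM (what is proved, stated in full; the proofs are below) =====
def Claim_equal_rows_to_tab_text_py : Prop := ∀ (rows : List (List String)), Dom_rows_to_tab_text_py rows → Spec_rows_to_tab_text_py rows (rows_to_tab_text_py rows)

-- ===== LEMMAS AND PROOFS =====

-- B's per-row forward scan, named for the proofs (definitionally B's inline fold)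
def pvLastIdx (t : List String) : Int :=
  (PySem.List.enumerate t).foldl (fun last p => if !(p.2 == "") then p.1 else last) (-1 : Int)

theorem pvLastIdx_append (t : List String) (x : String) :
    pvLastIdx (t ++ [x]) = if x == "" then pvLastIdx t else (t.length : Int) := by
  unfold pvLastIdx
  rw [PySem.List.enumerate_append, List.foldl_append]
  by_cases h : x = "" <;>
    simp [h, PySem.List.enumerate_cons, PySem.List.enumerate_nil]

theorem pvLastIdx_bounds (t : List String) :
    -1 ≤ pvLastIdx t ∧ pvLastIdx t < (t.length : Int) := by
  induction t using List.reverseRecOn with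
  | nil => simp [pvLastIdx, PySem.List.enumerate_nil]
  | append_singleton t x ih =>
    rw [pvLastIdx_append]
    by_cases h : x = "" <;> simp [h] <;> omega

theorem pvPop_append (t : List String) (x : String) :
    (pvPopEmptyRev (t ++ [x]).reverse).reverse
      = if x == "" then (pvPopEmptyRev t.reverse).reverse else t ++ [x] := by
  rw [List.reverse_append]
  by_cases h : x = "" <;> simp [pvPopEmptyRev, h]

theorem pvPop_eq_take (t : List String) :
    (pvPopEmptyRev t.reverse).reverse = t.take (pvLastIdx t + 1).toNat := by
  induction t using List.reverseRecOn with
  | nil => simp [pvPopEmptyRev, pvLastIdx, PySem.List.enumerate_nil]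
  | append_singleton t x ih =>
    rw [pvPop_append, pvLastIdx_append]
    by_cases h : x = ""
    · have hb := pvLastIdx_bounds t
      have hle : (pvLastIdx t + 1).toNat ≤ t.length := by omega
      simp [h, ih, List.take_append_of_le_length hle]
    · have hlen : (t ++ [x]).length ≤ ((t.length : Int) + 1).toNat := by
        simp
      simp [h, List.take_of_length_le hlen]

theorem pvPop_any (t : List String) :
    ((pvPopEmptyRev t.reverse).reverse.any (fun s => !(s == "")))
      = decide (0 ≤ pvLastIdx t) := by
  induction t using List.reverseRecOn with
  | nil => simp [pvPopEmptyRev, pvLastIdx, PySem.List.enumerate_nil]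
  | append_singleton t x ih =>
    rw [pvPop_append, pvLastIdx_append]
    by_cases h : x = ""
    · simp [h, ih]
    · simp [h]

-- the two per-row loop bodies agree
theorem pvRow_eq (lines : List String) (row : List String) :
    (let trimmed := row.map PySem.Str.strip
     let trimmed := (pvPopEmptyRev trimmed.reverse).reverse
     if trimmed.any (fun s => !(s == "")) then lines ++ [PySem.Str.join "\t" trimmed]
     else lines)
    = (let trimmed := row.map PySem.Str.strip
       let last := (PySem.List.enumerate trimmed).foldl
         (fun last p => if !(p.2 == "") then p.1 else last) (-1 : Int)
       if 0 ≤ last then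
         lines ++ [PySem.Str.join "\t" (PySem.List.slice trimmed none (some (last + 1)))]
       else lines) := by
  set t := row.map PySem.Str.strip with ht
  show (if ((pvPopEmptyRev t.reverse).reverse.any (fun s => !(s == ""))) then
          lines ++ [PySem.Str.join "\t" ((pvPopEmptyRev t.reverse).reverse)] else lines)
      = (if 0 ≤ pvLastIdx t then
          lines ++ [PySem.Str.join "\t" (PySem.List.slice t none (some (pvLastIdx t + 1)))]
        else lines)
  rw [pvPop_any, pvPop_eq_take]
  by_cases h : 0 ≤ pvLastIdx t
  · have h1 : (0:Int) ≤ pvLastIdx t + 1 := by omega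
    rw [PySem.List.slice_to t h1]
    simp [h]
  · simp [h]

-- ===== VERDICT (by name: the statement is the Claim_ definition above) =====
theorem rows_to_tab_text_py_spec : Claim_equal_rows_to_tab_text_py := by
  intro rows _
  show rows_to_tab_text_py rows = rows_to_tab_text_py_alt rows
  unfold rows_to_tab_text_py rows_to_tab_text_py_alt
  refine congrArg (PySem.Str.join "\n") ?_
  apply PySem.List.foldl_congr_mem
  intro acc x _
  exact pvRow_eq acc x
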